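-- pv_equiv track=rewrite | github.com/BufaloBob/R4yN300 | Rayneo/main.py | find_keyword_token_index
-- ===== SOURCE A (Python) =====
-- def find_keyword_token_index(line_tokens, keyword_tokens):
--     if not line_tokens or not keyword_tokens or len(keyword_tokens) > len(line_tokens):
--         return None
--     k_len = len(keyword_tokens)
--     for i in range(len(line_tokens) - k_len + 1):
--         if line_tokens[i:i + k_len] == keyword_tokens:
--             return i + (k_len // 2)
--     return None
-- ===== SOURCE B (Python) =====
-- def _tok_hash(t):
--     return sum(map(ord, t))
--
-- def find_keyword_token_index(line_tokens, keyword_tokens):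
--     n = len(line_tokens)
--     k = len(keyword_tokens)
--     if k == 0 or k > n:
--         return None
--     target = sum(_tok_hash(t) for t in keyword_tokens)
--     th = [_tok_hash(t) for t in line_tokens]
--     h = sum(th[:k])
--     for i in range(n - k + 1):
--         if h == target and line_tokens[i:i + k] == keyword_tokens:
--             return i + k // 2
--         if i + k < n:
--             h += th[i + k] - th[i]
--     return None
-- ===== Notes on version B (the rewrite author's own statement) =====
-- stated objective: alternative
-- what changed: Replaced A's per-position slice comparison with a Rabin-Karp-style rolling token-hash (sum of char codes per token) that filters positions with an O(1) hash test and verifies only on hash hits.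
import Mathlib
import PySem

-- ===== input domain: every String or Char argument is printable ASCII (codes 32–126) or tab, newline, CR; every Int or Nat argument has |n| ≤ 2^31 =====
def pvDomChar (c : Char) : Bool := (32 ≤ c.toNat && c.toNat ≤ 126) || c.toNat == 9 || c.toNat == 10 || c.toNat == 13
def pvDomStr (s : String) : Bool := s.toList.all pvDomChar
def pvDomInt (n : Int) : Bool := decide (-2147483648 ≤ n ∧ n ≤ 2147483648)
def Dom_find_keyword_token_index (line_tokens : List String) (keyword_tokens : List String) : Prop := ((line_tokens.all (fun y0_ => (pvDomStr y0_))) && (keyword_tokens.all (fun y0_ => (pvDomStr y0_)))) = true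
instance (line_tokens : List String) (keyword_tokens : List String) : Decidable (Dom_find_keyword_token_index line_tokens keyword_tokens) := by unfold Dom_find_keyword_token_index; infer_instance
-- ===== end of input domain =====

-- B replaces A's per-position slice comparison with a Rabin-Karp-style rolling token-hash filter (verified on hash hits); objective: alternative algorithm, same worst-case cost.

-- ===== PORT A =====
-- the 'for i in range(...)' loop of A, recursing over the index list
def pvLoopA (lt kt : List String) (k : Nat) : List Int → Option Int
  | [] => none
  | i :: rest =>
    if PySem.List.slice lt (some i) (some (i + (k : Int))) = kt then
      some (i + PySem.Int.floordiv (k : Int) 2)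
    else pvLoopA lt kt k rest

def find_keyword_token_index (line_tokens : List String) (keyword_tokens : List String) : Option Int :=
  if line_tokens = [] ∨ keyword_tokens = [] ∨ keyword_tokens.length > line_tokens.length then none
  else
    pvLoopA line_tokens keyword_tokens keyword_tokens.length
      (PySem.List.pyRange 0 ((line_tokens.length : Int) - keyword_tokens.length + 1) 1)

-- ===== PORT B =====
-- sum(map(ord, t))
def pvTokHash (s : String) : Int := (s.toList.map (fun c => (c.toNat : Int))).sum

-- B's loop: carries the rolling window hash h; th[i] accesses are in range whenever Python's are
def pvLoopB (lt kt : List String) (k n : Nat) (th : List Int) (target : Int) : List Int → Int → Option Int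
  | [], _ => none
  | i :: rest, h =>
    if h = target ∧ PySem.List.slice lt (some i) (some (i + (k : Int))) = kt then
      some (i + PySem.Int.floordiv (k : Int) 2)
    else
      pvLoopB lt kt k n th target rest
        (if i + (k : Int) < (n : Int) then
           h + (PySem.List.pyGetD th (i + (k : Int)) 0 - PySem.List.pyGetD th i 0)
         else h)

def find_keyword_token_index_alt (line_tokens : List String) (keyword_tokens : List String) : Option Int :=
  let n := line_tokens.length
  let k := keyword_tokens.length
  if k = 0 ∨ k > n then none
  else
    let target := (keyword_tokens.map pvTokHash).sum
    let th := line_tokens.map pvTokHash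
    let h := (PySem.List.slice th none (some (k : Int))).sum
    pvLoopB line_tokens keyword_tokens k n th target
      (PySem.List.pyRange 0 ((n : Int) - k + 1) 1) h

-- ===== PRECONDITION & SPEC =====
def Spec_find_keyword_token_index (line_tokens : List String) (keyword_tokens : List String) (out : Option Int) : Prop := out = find_keyword_token_index_alt line_tokens keyword_tokens
instance (line_tokens : List String) (keyword_tokens : List String) (out : Option Int) : Decidable (Spec_find_keyword_token_index line_tokens keyword_tokens out) := by unfold Spec_find_keyword_token_index; infer_instance

-- ===== CLAIM (what is proved, stated in full; the proofs are below) =====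
def Claim_equal_find_keyword_token_index : Prop := ∀ (line_tokens : List String) (keyword_tokens : List String), Dom_find_keyword_token_index line_tokens keyword_tokens → Spec_find_keyword_token_index line_tokens keyword_tokens (find_keyword_token_index line_tokens keyword_tokens)

-- ===== LEMMAS AND PROOFS =====

-- window hash of lt at position j
def pvW (lt : List String) (k j : Nat) : Int := (((lt.drop j).take k).map pvTokHash).sum

theorem pvW_target (lt kt : List String) (k j : Nat) (hk : k = kt.length)
    (h : ((lt.drop j).take k) = kt) :
    pvW lt k j = (kt.map pvTokHash).sum := by
  simp [pvW, h]

theorem pvW_roll (lt : List String) (k j : Nat) (hk : 0 < k) (hjk : j + k < lt.length) (hj : j < lt.length) :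
    pvW lt k (j + 1) = pvW lt k j + (pvTokHash (lt[j + k]'hjk) - pvTokHash (lt[j]'hj)) := by
  obtain ⟨m, rfl⟩ : ∃ m, k = m + 1 := ⟨k - 1, by omega⟩
  have hidx : (lt.drop (j + 1))[m]? = some (lt[j + (m + 1)]'hjk) := by
    rw [List.getElem?_drop, show j + 1 + m = j + (m + 1) by omega]
    exact List.getElem?_eq_getElem hjk
  have hd : lt.drop j = lt[j]'hj :: lt.drop (j + 1) := List.drop_eq_getElem_cons hj
  unfold pvW
  rw [hd, List.take_succ_cons]
  conv_lhs => rw [List.take_succ, hidx]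
  simp
  ring

theorem pvLoop_eq (lt kt : List String) (k n : Nat)
    (hk : 0 < k) (hkn : k ≤ n) (hn : n = lt.length) (hkk : k = kt.length) :
    ∀ (c j : Nat), j + c = n - k + 1 →
    pvLoopA lt kt k (PySem.List.pyRange (j : Int) ((n : Int) - k + 1) 1)
      = pvLoopB lt kt k n (lt.map pvTokHash) ((kt.map pvTokHash).sum)
          (PySem.List.pyRange (j : Int) ((n : Int) - k + 1) 1) (pvW lt k j) := by
  intro c
  induction c with
  | zero =>
    intro j hj
    have hempty : PySem.List.pyRange (j : Int) ((n : Int) - k + 1) 1 = [] := by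
      apply PySem.List.pyRange_one_eq_nil
      omega
    rw [hempty]
    rfl
  | succ c ih =>
    intro j hj
    have hlt : (j : Int) < (n : Int) - k + 1 := by omega
    rw [PySem.List.pyRange_one_cons hlt]
    rw [pvLoopA, pvLoopB]
    have hslice : PySem.List.slice lt (some (j : Int)) (some ((j : Int) + (k : Int)))
        = (lt.drop j).take k := by
      exact PySem.List.slice_natCast_add lt j k
    by_cases hm : (lt.drop j).take k = kt
    · -- match: both return
      have htgt : pvW lt k j = (kt.map pvTokHash).sum := pvW_target lt kt k j hkk hm
      rw [hslice]
      simp [hm, htgt]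
    · -- no match at j
      have hcondB : ¬ (pvW lt k j = (kt.map pvTokHash).sum
          ∧ PySem.List.slice lt (some (j : Int)) (some ((j : Int) + (k : Int))) = kt) := by
        rw [hslice]; tauto
      rw [if_neg (by rw [hslice]; exact hm), if_neg hcondB]
      by_cases hlast : c = 0
      · -- j was the last index: remaining range is empty, both loops return none
        have hempty : PySem.List.pyRange ((j : Int) + 1) ((n : Int) - k + 1) 1 = [] := by
          apply PySem.List.pyRange_one_eq_nil
          omega
        rw [hempty]
        rfl
      · -- more indices remain, so j + k < n and the rolling update is taken
        have hjk : j + k < n := by omega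
        have hguard : (j : Int) + (k : Int) < (n : Int) := by omega
        rw [if_pos hguard]
        have hgj : PySem.List.pyGetD (lt.map pvTokHash) (j : Int) 0 = pvTokHash (lt[j]'(by omega)) := by
          rw [PySem.List.pyGetD_natCast]
          rw [List.getD_eq_getElem _ _ (by simp; omega)]
          simp
        have hcast : (j : Int) + (k : Int) = ((j + k : Nat) : Int) := by push_cast; ring
        have hgjk : PySem.List.pyGetD (lt.map pvTokHash) ((j : Int) + (k : Int)) 0
            = pvTokHash (lt[j + k]'(by omega)) := by
          rw [hcast, PySem.List.pyGetD_natCast]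
          rw [List.getD_eq_getElem _ _ (by simp; omega)]
          simp
        have hroll : pvW lt k j
            + (PySem.List.pyGetD (lt.map pvTokHash) ((j : Int) + (k : Int)) 0
               - PySem.List.pyGetD (lt.map pvTokHash) (j : Int) 0)
            = pvW lt k (j + 1) := by
          rw [hgj, hgjk, pvW_roll lt k j hk (by omega) (by omega)]
        rw [hroll]
        have hjsucc : (j : Int) + 1 = ((j + 1 : Nat) : Int) := by push_cast; ring
        rw [hjsucc]
        exact ih (j + 1) (by omega)

-- ===== VERDICT (by name: the statement is the Claim_ definition above) =====
theorem find_keyword_token_index_spec : Claim_equal_find_keyword_token_index := by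
  unfold Claim_equal_find_keyword_token_index
  intro lt kt _
  unfold Spec_find_keyword_token_index
  unfold find_keyword_token_index find_keyword_token_index_alt
  by_cases hA : lt = [] ∨ kt = [] ∨ kt.length > lt.length
  · have hB : kt.length = 0 ∨ kt.length > lt.length := by
      rcases hA with h | h | h
      · by_cases hkt : kt = []
        · left; simp [hkt]
        · right; subst h; simp; exact List.length_pos_iff.mpr hkt
      · left; simp [h]
      · right; exact h
    rw [if_pos hA]
    simp only []
    rw [if_pos hB]
  · have hB : ¬ (kt.length = 0 ∨ kt.length > lt.length) := by
      push_neg at hA ⊢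
      constructor
      · simpa using hA.2.1
      · exact hA.2.2
    rw [if_neg hA]
    simp only []
    rw [if_neg hB]
    have hk : 0 < kt.length := by
      push_neg at hA; rcases hA with ⟨_, h2, _⟩
      exact List.length_pos_iff.mpr h2
    have hkn : kt.length ≤ lt.length := by push_neg at hA; exact hA.2.2
    have hinit : (PySem.List.slice (lt.map pvTokHash) none (some (kt.length : Int))).sum
        = pvW lt kt.length 0 := by
      rw [PySem.List.slice_to_natCast]
      simp [pvW, List.map_take]
    rw [hinit]
    exact pvLoop_eq lt kt kt.length lt.length hk hkn rfl rfl (lt.length - kt.length + 1) 0 (by omega)
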